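-- pv_equiv track=rewrite | github.com/miliar/Code_Jam_Webscraper | Solutions_python/Problem_181/557.py | solve
-- ===== SOURCE A (Python) =====
-- def solve(words):
--     """y is the minimum number of moves to make the strings identical. If there is no possible way to make all strings identical, print "Fegla Won" (quotes for clarity)."""
--     h = []
--     for i,c in enumerate(words):
--         idx = 0
--         if i == 0:
--             h.append(c)               # break
--         else:
--             if c >= h[0]:
--                 h.insert(0,c)
--             else:
--                 h.append(c)
--
--     w = "".join(h)
--     return w
-- ===== SOURCE B (Python) =====
-- def solve(words):
--     """y is the minimum number of moves to make the strings identical. If there is no possible way to make all strings identical, print "Fegla Won" (quotes for clarity)."""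
--     # Divide and conquer: for a segment, given the running maximum mx seen before it,
--     # return (front, back, new_mx) where front is the text the segment contributes in
--     # front of everything before it and back the text it contributes at the end.
--     def seg(lo, hi, mx):
--         if hi - lo <= 1:
--             c = words[lo]
--             if mx is None or c >= mx:
--                 return (c, "", c)
--             return ("", c, mx)
--         mid = (lo + hi) // 2
--         f1, b1, m1 = seg(lo, mid, mx)
--         f2, b2, m2 = seg(mid, hi, m1)
--         return (f2 + f1, b1 + b2, m2)
--
--     if not words:
--         return ""
--     f, b, _ = seg(0, len(words), None)
--     return f + b
-- ===== Notes on version B (the rewrite author's own statement) =====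
-- stated objective: alternative
-- what changed: Replaces A's sequential loop with front-insertion into one list keyed off h[0] by a divide-and-conquer recursion: each half-segment, given the running maximum before it, returns a (front, back, new_max) triple and two triples combine as (f2+f1, b1+b2, m2); A's quadratic insert(0,...) pattern disappears.
import Mathlib
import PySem

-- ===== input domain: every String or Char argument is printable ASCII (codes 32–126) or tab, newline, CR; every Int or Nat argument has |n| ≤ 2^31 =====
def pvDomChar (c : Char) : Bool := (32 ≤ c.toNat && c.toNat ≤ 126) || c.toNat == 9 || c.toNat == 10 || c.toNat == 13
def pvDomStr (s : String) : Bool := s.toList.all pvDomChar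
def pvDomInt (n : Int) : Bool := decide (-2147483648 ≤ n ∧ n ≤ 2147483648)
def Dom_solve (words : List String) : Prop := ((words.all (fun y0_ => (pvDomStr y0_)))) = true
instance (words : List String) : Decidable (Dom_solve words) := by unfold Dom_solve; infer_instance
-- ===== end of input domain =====

-- B replaces A's sequential front-insertion loop by a divide-and-conquer recursion in which each
-- half-segment yields a (front, back, new-max) triple and two triples are combined; alternative
-- decomposition, no speed claim.

-- ===== PORT A =====
-- A's loop: for i,c in enumerate(words): i==0 → append; c >= h[0] → insert at front; else append.
-- h[0] is read only when i ≠ 0, where h is provably nonempty, so headD "" is exact there;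
-- h.insert(0,c) is exactly cons.
def solveStep (h : List String) (ic : Int × String) : List String :=
  if ic.1 = 0 then h ++ [ic.2]
  else if h.headD "" ≤ ic.2 then ic.2 :: h
  else h ++ [ic.2]

def solve (words : List String) : String :=
  PySem.Str.join "" ((PySem.List.enumerate words).foldl solveStep [])

-- ===== PORT B =====
-- seg(lo, hi, mx) of Source B: the (front, back, new_mx) contribution of words[lo:hi] given the
-- running maximum mx before it.  Source B reads words[lo] only with lo in range, so getD is exact;
-- Source B's guard `hi - lo <= 1` is kept as is (it only makes the recursion total).
def solveSeg (words : List String) (lo hi : Nat) (mx : Option String) :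
    String × String × Option String :=
  if hi - lo ≤ 1 then
    let c := words.getD lo ""
    match mx with
    | none => (c, "", some c)
    | some m => if m ≤ c then (c, "", some c) else ("", c, mx)
  else
    let mid := (lo + hi) / 2
    let r1 := solveSeg words lo mid mx
    let r2 := solveSeg words mid hi r1.2.2
    (r2.1 ++ r1.1, r1.2.1 ++ r2.2.1, r2.2.2)
termination_by hi - lo
decreasing_by all_goals omega

def solve_alt (words : List String) : String :=
  if words = [] then ""
  else
    let r := solveSeg words 0 words.length none
    r.1 ++ r.2.1

-- ===== PRECONDITION & SPEC =====
def Spec_solve (words : List String) (out : String) : Prop := out = solve_alt words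
instance (words : List String) (out : String) : Decidable (Spec_solve words out) := by unfold Spec_solve; infer_instance

-- ===== CLAIM (what is proved, stated in full; the proofs are below) =====
def Claim_equal_solve : Prop := ∀ (words : List String), Dom_solve words → Spec_solve words (solve words)

-- ===== LEMMAS AND PROOFS =====

-- the characters of a list of strings, concatenated
def jl (h : List String) : List Char := (h.map String.toList).flatten

-- the sequential step both programs are related through: state (front, back, running max)
def altStep (s : String × String × Option String) (c : String) : String × String × Option String :=
  match s.2.2 with
  | none => (c ++ s.1, s.2.1, some c)
  | some m => if m ≤ c then (c ++ s.1, s.2.1, some c) else (s.1, s.2.1 ++ c, s.2.2)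

theorem join_empty_sep : ∀ (l : List (List Char)), PySem.Chars.join [] l = l.flatten := by
  intro l
  induction l with
  | nil => simp [PySem.Chars.join_nil]
  | cons a t ih =>
    cases t with
    | nil => simp [PySem.Chars.join_singleton]
    | cons b r =>
      rw [PySem.Chars.join_cons_cons]
      simp at ih ⊢
      simp [ih]

theorem toList_join_empty (l : List String) :
    (PySem.Str.join "" l).toList = jl l := by
  rw [PySem.Str.toList_join]
  simp [jl, join_empty_sep]

-- folding altStep from (f, b, m) factors through the fold from ("", "", m)
theorem foldl_altStep_shift (R : List String) :
    ∀ (f b : String) (m : Option String),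
      R.foldl altStep (f, b, m)
        = ((R.foldl altStep ("", "", m)).1 ++ f,
           b ++ (R.foldl altStep ("", "", m)).2.1,
           (R.foldl altStep ("", "", m)).2.2) := by
  induction R with
  | nil => intro f b m; simp [String.empty_append, String.append_empty]
  | cons c R ih =>
    intro f b m
    simp only [List.foldl_cons]
    cases m with
    | none =>
      simp only [altStep]
      rw [ih (c ++ f) b (some c), ih (c ++ "") "" (some c)]
      simp [String.append_empty, String.empty_append, String.append_assoc]
    | some m =>
      by_cases hle : m ≤ c
      · simp only [altStep, if_pos hle]
        rw [ih (c ++ f) b (some c), ih (c ++ "") "" (some c)]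
        simp [String.append_empty, String.empty_append, String.append_assoc]
      · simp only [altStep, if_neg hle]
        rw [ih f (b ++ c) (some m), ih "" ("" ++ c) (some m)]
        simp [String.append_empty, String.empty_append, String.append_assoc]

-- Source B's divide-and-conquer segment equals the sequential fold over the segment
theorem solveSeg_eq_foldl (words : List String) :
    ∀ (n lo hi : Nat) (mx : Option String), hi - lo = n → lo < hi → hi ≤ words.length →
      solveSeg words lo hi mx
        = ((words.drop lo).take (hi - lo)).foldl altStep ("", "", mx) := by
  intro n
  induction n using Nat.strong_induction_on with
  | _ n ih =>
    intro lo hi mx hn hlt hle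
    by_cases hbase : hi - lo ≤ 1
    · have hhi : hi = lo + 1 := by omega
      have hlo : lo < words.length := by omega
      rw [solveSeg]
      rw [if_pos hbase]
      have hdrop : words.drop lo = words[lo] :: words.drop (lo + 1) :=
        List.drop_eq_getElem_cons hlo
      have hget : words.getD lo "" = words[lo] := List.getD_eq_getElem words "" hlo
      have htake : (words.drop lo).take (hi - lo) = [words[lo]] := by
        rw [hhi, hdrop]
        have h1 : lo + 1 - lo = 1 := by omega
        rw [h1]
        rfl
      rw [htake]
      simp only [List.foldl_cons, List.foldl_nil, hget]
      cases mx with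
      | none =>
        simp only [altStep]
        rw [String.append_empty]
      | some m =>
        simp only [altStep]
        by_cases hm : m ≤ words[lo]
        · rw [if_pos hm, if_pos hm, String.append_empty]
        · rw [if_neg hm, if_neg hm, String.empty_append]
    · rw [solveSeg]
      rw [if_neg hbase]
      have hmidlt : lo < (lo + hi) / 2 ∧ (lo + hi) / 2 < hi := by omega
      set mid := (lo + hi) / 2 with hmid
      have h1 : solveSeg words lo mid mx
          = ((words.drop lo).take (mid - lo)).foldl altStep ("", "", mx) :=
        ih (mid - lo) (by omega) lo mid mx rfl (by omega) (by omega)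
      set r1 := ((words.drop lo).take (mid - lo)).foldl altStep ("", "", mx) with hr1
      have h2 : solveSeg words mid hi r1.2.2
          = ((words.drop mid).take (hi - mid)).foldl altStep ("", "", r1.2.2) :=
        ih (hi - mid) (by omega) mid hi r1.2.2 rfl (by omega) hle
      set r2 := ((words.drop mid).take (hi - mid)).foldl altStep ("", "", r1.2.2) with hr2
      have hsplit : (words.drop lo).take (hi - lo)
          = (words.drop lo).take (mid - lo) ++ (words.drop mid).take (hi - mid) := by
        have heq : hi - lo = (mid - lo) + (hi - mid) := by omega
        rw [heq, List.take_add, List.drop_drop]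
        have heq2 : lo + (mid - lo) = mid := by omega
        rw [heq2]
      simp only [h1, h2]
      rw [hsplit, List.foldl_append, ← hr1, foldl_altStep_shift]

theorem headD_append_singleton {α : Type} (l : List α) (x : α) (d : α) (h : l ≠ []) :
    (l ++ [x]).headD d = l.headD d := by
  cases l with
  | nil => exact absurd rfl h
  | cons a t => rfl

-- A's loop kept in lockstep with the sequential fold once started
theorem solve_loop_eq (rest : List String) :
    ∀ (s : Int) (h : List String) (f b : String), 1 ≤ s → h ≠ [] →
      jl h = f.toList ++ b.toList →
      let h' := (PySem.List.enumerate rest s).foldl solveStep h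
      let r := rest.foldl altStep (f, b, some (h.headD ""))
      h' ≠ [] ∧ some (h'.headD "") = r.2.2 ∧ jl h' = r.1.toList ++ r.2.1.toList := by
  induction rest with
  | nil =>
    intro s h f b _ hne hjl
    exact ⟨hne, rfl, hjl⟩
  | cons c rest ih =>
    intro s h f b hs hne hjl
    rw [PySem.List.enumerate_cons]
    simp only [List.foldl_cons]
    by_cases hle : h.headD "" ≤ c
    · have hA : solveStep h (s, c) = c :: h := by
        unfold solveStep
        rw [if_neg (by simpa using (by omega : s ≠ 0)), if_pos hle]
      have hB : altStep (f, b, some (h.headD "")) c = (c ++ f, b, some c) := by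
        simp only [altStep]
        rw [if_pos hle]
      rw [hA, hB]
      have hjl' : jl (c :: h) = (c ++ f).toList ++ b.toList := by
        simp [jl] at hjl ⊢
        simp [hjl]
      have := ih (s + 1) (c :: h) (c ++ f) b (by omega) (by simp) hjl'
      simpa using this
    · have hA : solveStep h (s, c) = h ++ [c] := by
        unfold solveStep
        rw [if_neg (by simpa using (by omega : s ≠ 0)), if_neg hle]
      have hB : altStep (f, b, some (h.headD "")) c = (f, b ++ c, some (h.headD "")) := by
        simp only [altStep]
        rw [if_neg hle]
      rw [hA, hB]
      have hjl' : jl (h ++ [c]) = f.toList ++ (b ++ c).toList := by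
        simp [jl] at hjl ⊢
        simp [hjl]
      have := ih (s + 1) (h ++ [c]) f (b ++ c) (by omega) (by simp) hjl'
      rw [headD_append_singleton _ _ _ hne] at this
      simpa using this

-- ===== VERDICT (by name: the statement is the Claim_ definition above) =====
theorem solve_spec : Claim_equal_solve := by
  intro words _
  unfold Spec_solve solve solve_alt
  cases words with
  | nil => simp [PySem.List.enumerate]; rfl
  | cons c ws =>
    rw [if_neg (by simp)]
    rw [PySem.List.enumerate_cons]
    simp only [List.foldl_cons]
    have hA0 : solveStep [] ((0 : Int), c) = [c] := by simp [solveStep]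
    rw [hA0]
    have hseg : solveSeg (c :: ws) 0 (c :: ws).length none
        = (c :: ws).foldl altStep ("", "", none) := by
      have := solveSeg_eq_foldl (c :: ws) (c :: ws).length 0 (c :: ws).length none
        (by omega) (by simp) (by omega)
      simpa using this
    rw [hseg]
    simp only [List.foldl_cons]
    have hB0 : altStep ("", "", none) c = (c, "", some c) := by
      simp [altStep, String.append_empty]
    rw [hB0]
    have hmain := solve_loop_eq ws 1 [c] c "" (by omega) (by simp) (by simp [jl])
    obtain ⟨hne, _, hjl⟩ := hmain
    apply String.toList_inj.mp
    rw [toList_join_empty]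
    simpa using hjl
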